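-- pv_equiv track=rewrite | github.com/Drawich/Python | quizBrain/format_data.py | break_line_at_char
-- ===== SOURCE A (Python) =====
-- WIDTH = 80  # Screen width variable that is used to center text
--
-- def break_line_at_char(text, break_at_character):
--     """Inserts line breaks in text after characters_per_line characters from the last occurrence of
--     break_at_character."""
--     lines = []
--     current_line = []
--     current_length = 0
--     characters_per_line = WIDTH
--
--     for char in text:
--         if char == break_at_character and current_length >= characters_per_line:
--             lines.append(''.join(current_line))
--             current_line = [char]
--             current_length = 1
--         else:
--             current_line.append(char)
--             current_length += 1
--
--     lines.append(''.join(current_line))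
--     return '\n'.join(lines)
-- ===== SOURCE B (Python) =====
-- WIDTH = 80  # Screen width variable that is used to center text
--
-- def break_line_at_char(text, break_at_character):
--     """Skip-ahead reformulation: jump straight to the next break character at or
--     after WIDTH characters into the current line using str.find, instead of
--     walking the text character by character."""
--     if len(break_at_character) != 1:
--         # a single character can never equal a longer/empty string, so no breaks
--         return text
--     lines = []
--     start = 0
--     while True:
--         i = text.find(break_at_character, start + WIDTH)
--         if i == -1:
--             lines.append(text[start:])
--             return '\n'.join(lines)
--         lines.append(text[start:i])
--         start = i
-- ===== Notes on version B (the rewrite author's own statement) =====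
-- stated objective: faster
-- what changed: Replaces A's per-character loop maintaining current_line/current_length accumulators with a skip-ahead: repeatedly str.find the break character at or after WIDTH positions past the current line start and slice the text there (plus a guard returning text unchanged when the break string is not a single character, where A's per-char comparison never fires).
import Mathlib
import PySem

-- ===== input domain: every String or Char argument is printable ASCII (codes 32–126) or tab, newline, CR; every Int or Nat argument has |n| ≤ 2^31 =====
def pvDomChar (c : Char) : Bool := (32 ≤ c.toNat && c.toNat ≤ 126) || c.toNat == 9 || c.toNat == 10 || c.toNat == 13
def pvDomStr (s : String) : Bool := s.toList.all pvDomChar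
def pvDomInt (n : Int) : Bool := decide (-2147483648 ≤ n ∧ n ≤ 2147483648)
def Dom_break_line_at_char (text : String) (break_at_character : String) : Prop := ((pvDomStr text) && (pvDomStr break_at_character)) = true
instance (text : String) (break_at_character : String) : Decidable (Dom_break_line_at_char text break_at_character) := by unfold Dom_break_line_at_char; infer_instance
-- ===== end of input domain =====

set_option maxHeartbeats 1000000


-- B replaces A's per-character accumulator loop by a skip-ahead over the string using str.find;
-- the two are proved to return the same string on every input (both are total).

-- ===== PORT A =====
-- state = (lines, current_line, current_length); one step of A's for-loop
def pvAStep (bc : String) (st : List String × List Char × Nat) (ch : Char) :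
    List String × List Char × Nat :=
  if String.singleton ch = bc ∧ 80 ≤ st.2.2 then
    (st.1 ++ [String.ofList st.2.1], [ch], 1)
  else
    (st.1, st.2.1 ++ [ch], st.2.2 + 1)

def break_line_at_char (text : String) (break_at_character : String) : String :=
  let r := text.toList.foldl (pvAStep break_at_character) ([], [], 0)
  PySem.Str.join "\n" (r.1 ++ [String.ofList r.2.1])

-- ===== PORT B =====
-- the while-loop of B: the lines produced from position `start` on (as char lists).
-- The loop is run on fuel ≥ len(text): every iteration moves start forward by at
-- least 80, so the fuel never runs out before the find fails (proved in pvB_loop).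
def pvBLoop (t : List Char) (sub : List Char) : Nat → Nat → List (List Char)
  | 0, start => [t.drop start]
  | fuel + 1, start =>
    -- i = text.find(break_at_character, start + WIDTH); i == -1 is the first branch
    let i := PySem.Chars.findFrom t sub ((start : Int) + 80) none
    if i = -1 then
      [t.drop start]                                       -- text[start:]
    else
      -- text[start:i]; exact since 0 ≤ start ≤ i ≤ len t here
      (t.drop start).take (i.toNat - start) :: pvBLoop t sub fuel i.toNat

def break_line_at_char_alt (text : String) (break_at_character : String) : String :=
  if PySem.Str.len break_at_character ≠ 1 then
    text
  else
    PySem.Str.join "\n"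
      ((pvBLoop text.toList break_at_character.toList (text.toList.length + 1) 0).map
        String.ofList)

-- ===== PRECONDITION & SPEC =====
def Spec_break_line_at_char (text : String) (break_at_character : String) (out : String) : Prop := out = break_line_at_char_alt text break_at_character
instance (text : String) (break_at_character : String) (out : String) : Decidable (Spec_break_line_at_char text break_at_character out) := by unfold Spec_break_line_at_char; infer_instance

-- ===== CLAIM (what is proved, stated in full; the proofs are below) =====
def Claim_equal_break_line_at_char : Prop := ∀ (text : String) (break_at_character : String), Dom_break_line_at_char text break_at_character → Spec_break_line_at_char text break_at_character (break_line_at_char text break_at_character)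

-- ===== LEMMAS AND PROOFS =====

-- `pvPrependAll p ls` glues p onto the first line of ls
def pvPrependAll (p : List Char) : List (List Char) → List (List Char)
  | [] => [p]
  | l :: ls => (p ++ l) :: ls

-- common specification: the line segments of s when the current line still needs k
-- more characters before a break is allowed (k = 80 - current_length, truncated)
def pvSegs (c : Char) : List Char → Nat → List (List Char)
  | [], _ => [[]]
  | x :: xs, k =>
    if k = 0 ∧ x = c then [] :: pvPrependAll [x] (pvSegs c xs 79)
    else pvPrependAll [x] (pvSegs c xs (k - 1))

-- first index i ≥ k with t[i] = c
def pvFindIdxGe (t : List Char) (c : Char) (k : Nat) : Option Nat :=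
  match t, k with
  | [], _ => none
  | x :: xs, 0 => if x = c then some 0 else (pvFindIdxGe xs c 0).map (· + 1)
  | _ :: xs, k + 1 => (pvFindIdxGe xs c k).map (· + 1)

theorem pvPrependAll_ne_nil (p : List Char) (ls : List (List Char)) :
    pvPrependAll p ls ≠ [] := by
  cases ls <;> simp [pvPrependAll]

theorem pvPrependAll_nil (ls : List (List Char)) (h : ls ≠ []) :
    pvPrependAll [] ls = ls := by
  cases ls with
  | nil => exact absurd rfl h
  | cons l ls => simp [pvPrependAll]

theorem pvPrependAll_prependAll (a b : List Char) (ls : List (List Char)) :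
    pvPrependAll a (pvPrependAll b ls) = pvPrependAll (a ++ b) ls := by
  cases ls <;> simp [pvPrependAll]

theorem pvSegs_ne_nil (c : Char) (s : List Char) (k : Nat) : pvSegs c s k ≠ [] := by
  cases s with
  | nil => simp [pvSegs]
  | cons x xs =>
    simp only [pvSegs]
    split_ifs
    · simp
    · exact pvPrependAll_ne_nil _ _

theorem pvFindIdxGe_none (t : List Char) (c : Char) (k : Nat)
    (h : pvFindIdxGe t c k = none) : ∀ i, k ≤ i → t[i]? ≠ some c := by
  induction t generalizing k with
  | nil => intro i _; simp
  | cons x xs ih =>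
    cases k with
    | zero =>
      rw [pvFindIdxGe] at h
      split_ifs at h with hx
      -- the x = c branch is closed by split_ifs (some 0 = none is absurd)
      intro i _
      cases i with
      | zero => simpa using fun hxc => hx hxc
      | succ j =>
        simp only [List.getElem?_cons_succ]
        exact ih 0 (Option.map_eq_none_iff.mp h) j (Nat.zero_le _)
    | succ m =>
      rw [pvFindIdxGe] at h
      intro i hi
      cases i with
      | zero => omega
      | succ j =>
        simp only [List.getElem?_cons_succ]
        exact ih m (Option.map_eq_none_iff.mp h) j (by omega)

theorem pvFindIdxGe_some (t : List Char) (c : Char) (k i : Nat)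
    (h : pvFindIdxGe t c k = some i) :
    k ≤ i ∧ t[i]? = some c ∧ ∀ j, k ≤ j → j < i → t[j]? ≠ some c := by
  induction t generalizing k i with
  | nil => simp [pvFindIdxGe] at h
  | cons x xs ih =>
    cases k with
    | zero =>
      rw [pvFindIdxGe] at h
      split_ifs at h with hx
      · obtain rfl : i = 0 := by simpa using h.symm
        refine ⟨le_refl _, by simpa using hx, ?_⟩
        intro j _ hj; omega
      · rcases Option.map_eq_some_iff.mp h with ⟨j, hj, rfl⟩
        obtain ⟨_, hget, hmin⟩ := ih 0 j hj
        refine ⟨Nat.zero_le _, by simpa using hget, ?_⟩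
        intro m _ hm
        cases m with
        | zero => simpa using fun hxc => hx hxc
        | succ p =>
          simp only [List.getElem?_cons_succ]
          exact hmin p (Nat.zero_le _) (by omega)
    | succ n =>
      rw [pvFindIdxGe] at h
      rcases Option.map_eq_some_iff.mp h with ⟨j, hj, rfl⟩
      obtain ⟨hle, hget, hmin⟩ := ih n j hj
      refine ⟨by omega, by simpa using hget, ?_⟩
      intro m hm hm'
      cases m with
      | zero => omega
      | succ p =>
        simp only [List.getElem?_cons_succ]
        exact hmin p (by omega) (by omega)

theorem pvFindIdxGe_shift (t : List Char) (c : Char) (st k : Nat) :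
    pvFindIdxGe t c (st + k) = (pvFindIdxGe (t.drop st) c k).map (· + st) := by
  induction st generalizing t with
  | zero =>
    simp only [Nat.zero_add, List.drop_zero]
    cases pvFindIdxGe t c k <;> simp
  | succ n ih =>
    cases t with
    | nil => simp [pvFindIdxGe]
    | cons x xs =>
      have harith : n + 1 + k = (n + k) + 1 := by omega
      rw [harith]
      show (pvFindIdxGe xs c (n + k)).map (· + 1) = _
      rw [ih xs]
      simp only [List.drop_succ_cons]
      cases pvFindIdxGe (xs.drop n) c k <;> simp
      omega

-- prefix of a one-character list = that character sits at that position
theorem pvPrefix_singleton (c : Char) (t : List Char) (j : Nat) :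
    [c] <+: t.drop j ↔ t[j]? = some c := by
  constructor
  · rintro ⟨tl, htl⟩
    have : (t.drop j).head? = some c := by rw [← htl]; rfl
    rwa [List.head?_drop] at this
  · intro h
    have hd : (t.drop j).head? = some c := by rw [List.head?_drop]; exact h
    cases hdrop : t.drop j with
    | nil => rw [hdrop] at hd; simp at hd
    | cons a as =>
      rw [hdrop] at hd
      simp only [List.head?_cons, Option.some.injEq] at hd
      exact ⟨as, by simp [hd]⟩

-- bridge: Python's str.find(c, k) with a one-character needle computes pvFindIdxGe
theorem pvFindFrom_eq_findIdxGe (t : List Char) (c : Char) (k : Nat) :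
    PySem.Chars.findFrom t [c] ((k : Int)) none =
      (pvFindIdxGe t c k).elim (-1) (fun i => (i : Int)) := by
  by_cases hk : k ≤ t.length
  · cases h : pvFindIdxGe t c k with
    | none =>
      simp only [Option.elim]
      rw [PySem.Chars.findFrom_natCast_eq_neg_one_iff t [c] k hk, List.singleton_infix_iff]
      intro hmem
      rcases List.mem_iff_getElem?.mp hmem with ⟨j, hj⟩
      rw [List.getElem?_drop] at hj
      exact pvFindIdxGe_none t c k h (k + j) (by omega) hj
    | some i =>
      obtain ⟨hki, hti, hmin⟩ := pvFindIdxGe_some t c k i h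
      have hne : PySem.Chars.findFrom t [c] ((k : Int)) none ≠ -1 := by
        rw [Ne, PySem.Chars.findFrom_natCast_eq_neg_one_iff t [c] k hk, List.singleton_infix_iff]
        simp only [not_not]
        exact List.mem_iff_getElem?.mpr ⟨i - k, by rw [List.getElem?_drop]; rw [show k + (i - k) = i by omega]; exact hti⟩
      obtain ⟨h1, h2, h3⟩ := PySem.Chars.findFrom_natCast_spec t [c] k hk hne
      set F := PySem.Chars.findFrom t [c] ((k : Int)) none with hF
      have hFt : t[F.toNat]? = some c := (pvPrefix_singleton c t F.toNat).mp h2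
      have hkF : k ≤ F.toNat := by omega
      have heq : F.toNat = i := by
        rcases Nat.lt_trichotomy F.toNat i with hlt | heq | hgt
        · exact absurd hFt (hmin F.toNat hkF hlt)
        · exact heq
        · exact absurd ((pvPrefix_singleton c t i).mpr hti) (h3 i hki hgt)
      simp only [Option.elim]
      omega
  · have hnone : pvFindIdxGe t c k = none := by
      cases h : pvFindIdxGe t c k with
      | none => rfl
      | some i =>
        obtain ⟨hki, hti, _⟩ := pvFindIdxGe_some t c k i h
        have : i < t.length := by
          by_contra hge
          rw [List.getElem?_eq_none (by omega)] at hti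
          simp at hti
        omega
    rw [hnone]
    simp only [Option.elim]
    simp only [PySem.Chars.findFrom]
    split_ifs <;> first | rfl | omega

-- the same bridge, at the exact shape of the index pvBLoop uses
theorem pvFindFrom_eq_findIdxGe' (t : List Char) (c : Char) (start : Nat) :
    PySem.Chars.findFrom t [c] ((start : Int) + 80) none =
      (pvFindIdxGe t c (start + 80)).elim (-1) (fun i => (i : Int)) := by
  have hcast : ((start : Int) + 80) = ((start + 80 : Nat) : Int) := by push_cast; ring
  rw [hcast, pvFindFrom_eq_findIdxGe]

-- characterisation of pvSegs by the first break position
theorem pvSegs_eq (c : Char) (s : List Char) (k : Nat) :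
    pvSegs c s k =
      match pvFindIdxGe s c k with
      | none => [s]
      | some i => s.take i :: pvPrependAll [c] (pvSegs c (s.drop (i + 1)) 79) := by
  induction s generalizing k with
  | nil => simp [pvSegs, pvFindIdxGe]
  | cons x xs ih =>
    cases k with
    | zero =>
      by_cases hx : x = c
      · subst hx
        simp [pvSegs, pvFindIdxGe]
      · rw [pvSegs, pvFindIdxGe, if_neg (by simp [hx]), if_neg hx]
        rw [ih 0]
        cases h : pvFindIdxGe xs c 0 with
        | none => simp [pvPrependAll]
        | some j => simp [pvPrependAll, List.take_succ_cons, List.drop_succ_cons]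
    | succ n =>
      rw [pvSegs, pvFindIdxGe, if_neg (by omega)]
      simp only [Nat.add_sub_cancel]
      rw [ih n]
      cases h : pvFindIdxGe xs c n with
      | none => simp [pvPrependAll]
      | some j => simp [pvPrependAll, List.take_succ_cons, List.drop_succ_cons]

-- the condition of A's branch, for a one-character break string
theorem pvSingleton_eq_iff (x c : Char) : String.singleton x = String.singleton c ↔ x = c := by
  constructor
  · intro h
    have := congrArg String.toList h
    simpa using this
  · rintro rfl; rfl

-- A's loop computes pvSegs (n is kept equal to the current line's length)
theorem pvA_loop (c : Char) (s : List Char) (cur : List Char) (lines : List String) :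
    (fun r => r.1 ++ [String.ofList r.2.1])
        (s.foldl (pvAStep (String.singleton c)) (lines, cur, cur.length)) =
      lines ++ (pvPrependAll cur (pvSegs c s (80 - cur.length))).map String.ofList := by
  induction s generalizing cur lines with
  | nil => simp [pvSegs, pvPrependAll]
  | cons x xs ih =>
    rw [List.foldl_cons]
    by_cases hc : x = c ∧ 80 ≤ cur.length
    · have hstep : pvAStep (String.singleton c) (lines, cur, cur.length) x =
          (lines ++ [String.ofList cur], [x], 1) := by
        rw [pvAStep, if_pos ⟨(pvSingleton_eq_iff x c).mpr hc.1, hc.2⟩]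
      rw [hstep]
      have h1 : (1 : Nat) = ([x] : List Char).length := rfl
      rw [h1, ih]
      have hk : 80 - cur.length = 0 := by omega
      rw [pvSegs, hk, if_pos ⟨rfl, hc.1⟩]
      simp [pvPrependAll, List.map_cons]
    · have hstep : pvAStep (String.singleton c) (lines, cur, cur.length) x =
          (lines, cur ++ [x], cur.length + 1) := by
        rw [pvAStep, if_neg]
        intro hcontra
        exact hc ⟨(pvSingleton_eq_iff x c).mp hcontra.1, hcontra.2⟩
      rw [hstep]
      have h1 : cur.length + 1 = (cur ++ [x]).length := by simp
      rw [h1, ih]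
      rw [pvSegs]
      rw [if_neg (by rintro ⟨hk0, hxc⟩; exact hc ⟨hxc, by omega⟩)]
      rw [pvPrependAll_prependAll]
      have harith : 80 - (cur ++ [x]).length = 80 - cur.length - 1 := by
        simp only [List.length_append, List.length_cons, List.length_nil]
        omega
      rw [harith]

-- B's loop computes pvSegs, given enough fuel (start advances by ≥ 80 per step)
theorem pvB_loop (t : List Char) (sub : List Char) (c : Char) (hsc : sub = [c]) :
    ∀ fuel start, t.length ≤ fuel + start →
      pvBLoop t sub fuel start = pvSegs c (t.drop start) 80 := by
  subst hsc
  intro fuel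
  induction fuel with
  | zero =>
    intro start hn
    have hdropnil : t.drop start = [] := List.drop_eq_nil_of_le (by omega)
    simp only [pvBLoop, hdropnil]
    simp [pvSegs]
  | succ fuel ih =>
    intro start hn
    simp only [pvBLoop]
    simp only [pvFindFrom_eq_findIdxGe']
    cases h : pvFindIdxGe t c (start + 80) with
    | none =>
      simp only [Option.elim]
      rw [if_pos trivial]
      rw [pvSegs_eq]
      have := pvFindIdxGe_shift t c start 80
      rw [h] at this
      rcases hdrop : pvFindIdxGe (t.drop start) c 80 with _ | j
      · rfl
      · rw [hdrop] at this; simp at this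
    | some i =>
      obtain ⟨hki, hti, _⟩ := pvFindIdxGe_some t c (start + 80) i h
      have hlen : i < t.length := by
        by_contra hge
        rw [List.getElem?_eq_none (by omega)] at hti
        simp at hti
      simp only [Option.elim]
      rw [if_neg (by omega : ¬ ((i : Int) = -1))]
      have htoNat : ((i : Int)).toNat = i := Int.toNat_natCast i
      rw [htoNat]
      have hshift := pvFindIdxGe_shift t c start 80
      rw [h] at hshift
      rcases hdrop : pvFindIdxGe (t.drop start) c 80 with _ | j
      · rw [hdrop] at hshift; simp at hshift
      · rw [hdrop] at hshift
        simp only [Option.map_some, Option.some.injEq] at hshift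
        have hij : i = j + start := hshift
        rw [pvSegs_eq, hdrop]
        have hrec : pvBLoop t [c] fuel i = pvSegs c (t.drop i) 80 :=
          ih i (by omega)
        rw [hrec]
        have hdropi : t.drop i = c :: t.drop (i + 1) := by
          have hgi : t[i] = c := by
            rw [List.getElem?_eq_getElem hlen] at hti
            exact Option.some.inj hti
          rw [List.drop_eq_getElem_cons hlen, hgi]
        rw [hdropi]
        rw [pvSegs, if_neg (by omega)]
        congr 2
        · omega
        · rw [List.drop_drop]
          have : i + 1 = start + (j + 1) := by omega
          rw [this]

-- with a break string that is not a single character, A's branch never fires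
theorem pvA_const (bc : String) (hbc : ∀ x : Char, String.singleton x ≠ bc)
    (s : List Char) (lines : List String) (cur : List Char) (n : Nat) :
    s.foldl (pvAStep bc) (lines, cur, n) = (lines, cur ++ s, n + s.length) := by
  induction s generalizing cur n with
  | nil => simp
  | cons x xs ih =>
    rw [List.foldl_cons, pvAStep, if_neg (fun hcontra => hbc x hcontra.1)]
    rw [ih]
    simp
    omega

-- ===== VERDICT (by name: the statement is the Claim_ definition above) =====
theorem break_line_at_char_spec : Claim_equal_break_line_at_char := by
  intro text bc _
  show break_line_at_char text bc = break_line_at_char_alt text bc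
  by_cases hl : PySem.Str.len bc = 1
  · -- single-character break string
    have hlen : bc.toList.length = 1 := by
      rw [PySem.Str.len_eq] at hl
      exact_mod_cast hl
    obtain ⟨c, hc⟩ : ∃ c, bc.toList = [c] := List.length_eq_one_iff.mp hlen
    have hbcs : bc = String.singleton c := by
      have : String.ofList bc.toList = String.ofList [c] := by rw [hc]
      rwa [String.ofList_toList] at this
    subst hbcs
    rw [break_line_at_char]
    have hA := pvA_loop c text.toList [] []
    simp only [List.length_nil, List.nil_append, Nat.sub_zero] at hA
    show PySem.Str.join "\n"
        ((text.toList.foldl (pvAStep (String.singleton c)) ([], [], 0)).1 ++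
          [String.ofList (text.toList.foldl (pvAStep (String.singleton c)) ([], [], 0)).2.1]) = _
    rw [hA]
    rw [pvPrependAll_nil _ (pvSegs_ne_nil c text.toList _)]
    rw [break_line_at_char_alt, if_neg (fun h => h hl)]
    rw [pvB_loop text.toList _ c hc (text.toList.length + 1) 0 (by omega)]
    rw [List.drop_zero]
  · -- break string of length ≠ 1: no break ever fires, A returns the text unchanged
    rw [break_line_at_char_alt, if_pos hl]
    rw [break_line_at_char]
    have hbc : ∀ x : Char, String.singleton x ≠ bc := by
      intro x hx
      apply hl
      rw [PySem.Str.len_eq, ← hx]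
      simp
    rw [pvA_const bc hbc text.toList [] [] 0]
    show PySem.Str.join "\n" ([String.ofList ([] ++ text.toList)]) = text
    rw [List.nil_append]
    rw [PySem.Str.join]
    simp [PySem.Chars.join, List.intercalate]
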